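-- pv_equiv track=rewrite | github.com/conk7/knowledge_graph_builder | src/dataset_parser/extract_contexts.py | check_match_with_proximity
-- ===== SOURCE A (Python) =====
-- import math
-- from typing import Any, Dict, List, Optional, Tuple
--
-- def check_match_with_proximity(
--     target_lemmas: List[str],
--     target_head_lemma: Optional[str],
--     sent_lemma_seq: List[str],
-- ) -> bool:
--     """
--     Checks if target_lemmas closely match inside sent_lemma_seq within a specific window limit.
--     Requires 100% of lemmas if target has <=2 words, and at least 75% for 3+ words.
--     Also requires the head word to be present.
--     """
--     if not target_lemmas:
--         return False
--
--     if target_head_lemma and target_head_lemma not in sent_lemma_seq: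
--         return False
--
--     total = len(target_lemmas)
--     required = total if total <= 2 else math.ceil(total * 0.75)
--
--     target_set = set(target_lemmas)
--
--     # Indices in the sentence where any target lemma appears
--     match_indices = [i for i, lemma in enumerate(sent_lemma_seq) if lemma in target_set]
--
--     # Fast exit
--     if len(set(sent_lemma_seq[i] for i in match_indices)) < required:
--         return False
--
--     # Linear sliding window: maximum span of 15 tokens between first and last match
--     end = 0
--     for start in range(len(match_indices)):
--         # Advance end pointer to include all indices within the 15-token window
--         while (
--             end < len(match_indices) and match_indices[end] - match_indices[start] <= 15
--         ):
--             end += 1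
--         # Check uniqueness in window [start, end)
--         unique_lemmas = set(sent_lemma_seq[k] for k in match_indices[start:end])
--         if len(unique_lemmas) >= required and (
--             not target_head_lemma or target_head_lemma in unique_lemmas
--         ):
--             return True
--
--     return False
-- ===== SOURCE B (Python) =====
-- import math
-- from typing import List, Optional
--
--
-- def check_match_with_proximity(
--     target_lemmas: List[str],
--     target_head_lemma: Optional[str],
--     sent_lemma_seq: List[str],
-- ) -> bool:
--     if not target_lemmas:
--         return False
--     if target_head_lemma and target_head_lemma not in sent_lemma_seq:
--         return False
--     total = len(target_lemmas)
--     required = total if total <= 2 else math.ceil(total * 0.75)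
--     target_set = set(target_lemmas)
--     for i in range(len(sent_lemma_seq)):
--         unique = {w for w in sent_lemma_seq[i : i + 16] if w in target_set}
--         if len(unique) >= required and (
--             not target_head_lemma or target_head_lemma in unique
--         ):
--             return True
--     return False
-- ===== Notes on version B (the rewrite author's own statement) =====
-- stated objective: alternative
-- what changed: B drops A's match_indices precomputation, the global-unique fast exit and the two-pointer start/end scan, and instead slides a plain 16-token window over every sentence position, building the set of target lemmas in each window directly.
import Mathlib
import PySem

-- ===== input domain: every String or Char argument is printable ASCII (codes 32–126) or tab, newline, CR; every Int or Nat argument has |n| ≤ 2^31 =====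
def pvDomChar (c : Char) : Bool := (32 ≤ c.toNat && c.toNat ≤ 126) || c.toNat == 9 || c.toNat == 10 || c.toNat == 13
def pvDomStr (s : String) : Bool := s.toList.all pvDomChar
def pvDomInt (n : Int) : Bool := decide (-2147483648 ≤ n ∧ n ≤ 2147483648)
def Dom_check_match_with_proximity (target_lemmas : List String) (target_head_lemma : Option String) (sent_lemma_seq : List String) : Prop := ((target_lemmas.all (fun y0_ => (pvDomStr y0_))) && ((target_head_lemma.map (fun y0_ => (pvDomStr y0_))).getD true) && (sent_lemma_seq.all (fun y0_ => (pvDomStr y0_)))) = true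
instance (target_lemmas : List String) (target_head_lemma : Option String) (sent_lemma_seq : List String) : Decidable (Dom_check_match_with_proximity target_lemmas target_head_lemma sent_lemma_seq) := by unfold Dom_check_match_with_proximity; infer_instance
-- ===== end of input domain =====

-- B replaces A's match-index precomputation, global-unique fast exit and two-pointer scan
-- by a plain 16-token window slid over every sentence position (objective: alternative).

-- shared helper: Python truthiness of an Optional[str] (None and '' are falsy)
def pvTruthy (h : Option String) : Bool :=
  match h with
  | none => false
  | some s => !(s == "")

-- shared helper: 'target_head_lemma in u' (only consulted when the option is Some)
def pvHeadIn (h : Option String) (u : List String) : Bool :=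
  match h with
  | none => false
  | some s => u.contains s

-- ===== PORT A =====
-- the 'while end < len(mi) and mi[end] - mi[start] <= 15' loop; mi holds Nat positions, and
-- Nat truncated subtraction is exact here: Python's (possibly negative) difference is ≤ 15
-- iff mi[end] ≤ v + 15, which is exactly when the truncated difference is ≤ 15
def pvAdvEnd (mi : List Nat) (v : Nat) (e : Nat) : Nat :=
  if h : e < mi.length ∧ mi.getD e 0 - v ≤ 15 then pvAdvEnd mi v (e + 1) else e
termination_by mi.length - e
decreasing_by omega

-- the 'for start in range(len(match_indices))' loop carrying the mutable 'end';
-- sent[k] for k in match_indices is ported as getD (every k is a valid index by construction)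
def pvLoopA (sent : List String) (required : Nat) (h : Option String) (mi : List Nat) (start e : Nat) : Bool :=
  if hs : start < mi.length then
    let e' := pvAdvEnd mi (mi.getD start 0) e
    let uniq : PySem.Set String := PySem.Set.ofList (((mi.drop start).take (e' - start)).map (fun k => sent.getD k ""))
    if required ≤ uniq.length && (!pvTruthy h || pvHeadIn h uniq) then true
    else pvLoopA sent required h mi (start + 1) e'
  else false
termination_by mi.length - start

def check_match_with_proximity (target_lemmas : List String) (target_head_lemma : Option String) (sent_lemma_seq : List String) : Bool :=
  if target_lemmas.isEmpty then false
  else if pvTruthy target_head_lemma && !(pvHeadIn target_head_lemma sent_lemma_seq) then false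
  else
    let total := target_lemmas.length
    -- math.ceil(total * 0.75) is exact for these float values and equals (3*total+3)/4
    let required := if total ≤ 2 then total else (3 * total + 3) / 4
    let tset : PySem.Set String := PySem.Set.ofList target_lemmas
    -- '[i for i, lemma in enumerate(sent) if lemma in target_set]': the indices i with sent[i] in target_set
    let mi : List Nat := (List.range sent_lemma_seq.length).filter (fun i => tset.contains (sent_lemma_seq.getD i ""))
    if (PySem.Set.ofList (mi.map (fun i => sent_lemma_seq.getD i ""))).length < required then false
    else pvLoopA sent_lemma_seq required target_head_lemma mi 0 0

-- ===== PORT B =====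
-- 'for i in range(len(sent))' with the 16-token slice window sent[i:i+16]
def pvLoopB (sent : List String) (tset : PySem.Set String) (required : Nat) (h : Option String) (i : Nat) : Bool :=
  if hi : i < sent.length then
    let uniq : PySem.Set String := PySem.Set.ofList (((sent.drop i).take 16).filter (fun w => tset.contains w))
    if required ≤ uniq.length && (!pvTruthy h || pvHeadIn h uniq) then true
    else pvLoopB sent tset required h (i + 1)
  else false
termination_by sent.length - i

def check_match_with_proximity_alt (target_lemmas : List String) (target_head_lemma : Option String) (sent_lemma_seq : List String) : Bool :=
  if target_lemmas.isEmpty then false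
  else if pvTruthy target_head_lemma && !(pvHeadIn target_head_lemma sent_lemma_seq) then false
  else
    let total := target_lemmas.length
    let required := if total ≤ 2 then total else (3 * total + 3) / 4
    let tset : PySem.Set String := PySem.Set.ofList target_lemmas
    pvLoopB sent_lemma_seq tset required target_head_lemma 0

-- ===== PRECONDITION & SPEC =====
def Spec_check_match_with_proximity (target_lemmas : List String) (target_head_lemma : Option String) (sent_lemma_seq : List String) (out : Bool) : Prop := out = check_match_with_proximity_alt target_lemmas target_head_lemma sent_lemma_seq
instance (target_lemmas : List String) (target_head_lemma : Option String) (sent_lemma_seq : List String) (out : Bool) : Decidable (Spec_check_match_with_proximity target_lemmas target_head_lemma sent_lemma_seq out) := by unfold Spec_check_match_with_proximity; infer_instance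

-- ===== CLAIM (what is proved, stated in full; the proofs are below) =====
def Claim_equal_check_match_with_proximity : Prop := ∀ (target_lemmas : List String) (target_head_lemma : Option String) (sent_lemma_seq : List String), Dom_check_match_with_proximity target_lemmas target_head_lemma sent_lemma_seq → Spec_check_match_with_proximity target_lemmas target_head_lemma sent_lemma_seq (check_match_with_proximity target_lemmas target_head_lemma sent_lemma_seq)

-- ===== LEMMAS AND PROOFS =====

-- B's window of target lemmas at position i, its index form, and the per-window test
def pvW (s : List String) (P : String → Bool) (i : Nat) : List String :=
  ((s.drop i).take 16).filter P
def pvK (s : List String) (P : String → Bool) (i : Nat) : List Nat :=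
  (List.range s.length).filter (fun k => decide (i ≤ k) && decide (k < i + 16) && P (s.getD k ""))
def pvCond (s : List String) (P : String → Bool) (required : Nat) (h : Option String) (i : Nat) : Bool :=
  let uniq : PySem.Set String := PySem.Set.ofList (pvW s P i)
  required ≤ uniq.length && (!pvTruthy h || pvHeadIn h uniq)

theorem pv_tw_lt {α : Type} (q : α → Bool) (d : α) : ∀ (l : List α) (j : Nat),
    j < (l.takeWhile q).length → q (l.getD j d) = true := by
  intro l
  induction l with
  | nil => intro j hj; simp at hj
  | cons a t ih =>
    intro j hj
    by_cases hq : q a = true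
    · cases j with
      | zero => simpa using hq
      | succ j' =>
        simp only [List.takeWhile_cons, hq, if_true, List.length_cons] at hj
        simpa using ih j' (by omega)
    · simp [List.takeWhile_cons, hq] at hj

theorem pv_tw_stop {α : Type} (q : α → Bool) (d : α) : ∀ (l : List α),
    (l.takeWhile q).length < l.length → q (l.getD (l.takeWhile q).length d) = false := by
  intro l
  induction l with
  | nil => intro hl; simp at hl
  | cons a t ih =>
    intro hl
    by_cases hq : q a = true
    · simp only [List.takeWhile_cons, hq, if_true, List.length_cons] at hl ⊢
      simpa using ih (by omega)
    · simp [List.takeWhile_cons, hq]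

theorem pv_tw_mono {α : Type} (p q : α → Bool) (hpq : ∀ x, p x = true → q x = true) :
    ∀ (l : List α), (l.takeWhile p).length ≤ (l.takeWhile q).length := by
  intro l
  induction l with
  | nil => simp
  | cons a t ih =>
    by_cases hp : p a = true
    · simp [List.takeWhile_cons, hp, hpq a hp]; omega
    · simp [List.takeWhile_cons, hp]

theorem pv_advEnd_eq (mi : List Nat) (v : Nat) : ∀ (e : Nat),
    e ≤ (mi.takeWhile (fun k => decide (k ≤ v + 15))).length →
    pvAdvEnd mi v e = (mi.takeWhile (fun k => decide (k ≤ v + 15))).length := by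
  intro e
  fun_induction pvAdvEnd mi v e with
  | case1 e h ih =>
    intro he
    apply ih
    -- show e + 1 ≤ cnt, i.e. e < cnt
    rcases Nat.lt_or_ge e (mi.takeWhile (fun k => decide (k ≤ v + 15))).length with hlt | hge
    · omega
    · exfalso
      have heq : e = (mi.takeWhile (fun k => decide (k ≤ v + 15))).length := by omega
      have := pv_tw_stop (fun k => decide (k ≤ v + 15)) 0 mi (by omega)
      rw [← heq] at this
      simp only [decide_eq_false_iff_not, Nat.not_le] at this
      have h2 := h.2
      omega
  | case2 e h =>
    intro he
    have hcntle : (mi.takeWhile (fun k => decide (k ≤ v + 15))).length ≤ mi.length :=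
      (List.takeWhile_sublist _).length_le
    rcases Nat.lt_or_ge e (mi.takeWhile (fun k => decide (k ≤ v + 15))).length with hlt | hge
    · exfalso
      have := pv_tw_lt (fun k => decide (k ≤ v + 15)) 0 mi e hlt
      simp only [decide_eq_true_eq] at this
      exact h ⟨by omega, by omega⟩
    · omega

theorem pv_sliceMap : ∀ (s : List String) (i m : Nat),
    (s.drop i).take m
      = (((List.range s.length).filter (fun k => decide (i ≤ k) && decide (k < i + m))).map (fun k => s.getD k "")) := by
  intro s
  induction s with
  | nil => intro i m; simp
  | cons x t ih =>
    intro i m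
    rw [List.length_cons, List.range_succ_eq_map, List.filter_cons]
    cases i with
    | zero =>
      cases m with
      | zero =>
        simp
      | succ m' =>
        rw [if_pos (by simp)]
        simp only [List.drop_zero, List.take_succ_cons, List.map_cons, List.getD_cons_zero]
        congr 1
        rw [List.filter_map, List.map_map]
        rw [List.filter_congr (fun k (_ : k ∈ List.range t.length) => by
          simp only [Function.comp_apply, ← Bool.decide_and]
          exact (decide_eq_decide.mpr (by omega) :
            decide (0 ≤ Nat.succ k ∧ Nat.succ k < 0 + (m' + 1)) = decide (0 ≤ k ∧ k < 0 + m')))]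
        rw [show (fun k => decide (0 ≤ k ∧ k < 0 + m')) = (fun k => decide (0 ≤ k) && decide (k < 0 + m')) from funext (fun k => by rw [Bool.decide_and])]
        have := ih 0 m'
        simp only [List.drop_zero] at this
        rw [this]
        apply List.map_congr_left
        intro k _
        simp [Function.comp]
    | succ i' =>
      rw [if_neg (by simp)]
      simp only [List.drop_succ_cons]
      rw [List.filter_map, List.map_map]
      rw [List.filter_congr (fun k (_ : k ∈ List.range t.length) => by
        simp only [Function.comp_apply, ← Bool.decide_and]
        exact (decide_eq_decide.mpr (by omega) :
          decide (i' + 1 ≤ Nat.succ k ∧ Nat.succ k < i' + 1 + m) = decide (i' ≤ k ∧ k < i' + m)))]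
      rw [show (fun k => decide (i' ≤ k ∧ k < i' + m)) = (fun k => decide (i' ≤ k) && decide (k < i' + m)) from funext (fun k => by rw [Bool.decide_and])]
      rw [ih i' m]
      apply List.map_congr_left
      intro k _
      simp [Function.comp]

theorem pv_W_eq_map (s : List String) (P : String → Bool) (i : Nat) :
    pvW s P i = (pvK s P i).map (fun k => s.getD k "") := by
  unfold pvW pvK
  rw [pv_sliceMap s i 16, List.filter_map, List.filter_filter]
  congr 1
  apply List.filter_congr
  intro k _
  simp only [Function.comp_apply]
  cases P (s.getD k "") <;> simp

theorem pv_filter_le_eq_takeWhile : ∀ (l : List Nat) (c : Nat), l.Pairwise (· < ·) →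
    l.filter (fun k => decide (k ≤ c)) = l.takeWhile (fun k => decide (k ≤ c)) := by
  intro l
  induction l with
  | nil => intro c _; simp
  | cons a t ih =>
    intro c hp
    rw [List.pairwise_cons] at hp
    by_cases ha : a ≤ c
    · simp only [List.filter_cons, List.takeWhile_cons, ha, decide_true, if_true, ih c hp.2]
    · simp only [List.filter_cons, List.takeWhile_cons, ha, decide_false, if_false,
        Bool.false_eq_true]
      rw [List.filter_eq_nil_iff.mpr]
      intro x hx
      have := hp.1 x hx
      simp
      omega

theorem pv_filter_drop (t : List Nat) (ht : t.Pairwise (· < ·)) (start : Nat)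
    (hs : start < t.length) :
    t.filter (fun k => decide (t.getD start 0 ≤ k)) = t.drop start := by
  have hget := List.pairwise_iff_getElem.mp ht
  set v := t.getD start 0 with hv
  conv_lhs => rw [← List.take_append_drop start t]
  rw [List.filter_append]
  rw [List.filter_eq_nil_iff.mpr, List.filter_eq_self.mpr]
  · simp
  · intro x hx
    rw [List.mem_iff_getElem] at hx
    obtain ⟨j, hj, rfl⟩ := hx
    simp only [List.length_drop] at hj
    rw [List.getElem_drop]
    rw [hv, List.getD_eq_getElem t 0 hs]
    simp only [decide_eq_true_eq]
    rcases Nat.eq_zero_or_pos j with h0 | h0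
    · subst h0; simp
    · exact Nat.le_of_lt (hget start (start + j) hs (by omega) (by omega))
  · intro x hx
    rw [List.mem_iff_getElem] at hx
    obtain ⟨j, hj, rfl⟩ := hx
    simp only [List.length_take] at hj
    have hjs : j < start := by omega
    have hjlen : j < t.length := by omega
    rw [List.getElem_take]
    have := hget j start hjlen hs hjs
    rw [hv, List.getD_eq_getElem t 0 hs]
    simp
    omega

theorem pv_slice_eq (mi : List Nat) (hl : mi.Pairwise (· < ·)) (start : Nat) (hs : start < mi.length) :
    (mi.drop start).take ((mi.takeWhile (fun k => decide (k ≤ mi.getD start 0 + 15))).length - start)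
      = mi.filter (fun k => decide (mi.getD start 0 ≤ k) && decide (k ≤ mi.getD start 0 + 15)) := by
  have htw : mi.takeWhile (fun k => decide (k ≤ mi.getD start 0 + 15))
      = mi.take (mi.takeWhile (fun k => decide (k ≤ mi.getD start 0 + 15))).length :=
    List.prefix_iff_eq_take.mp (List.takeWhile_prefix _)
  set cnt := (mi.takeWhile (fun k => decide (k ≤ mi.getD start 0 + 15))).length with hcnt
  have hcntle : cnt ≤ mi.length := (List.takeWhile_sublist _).length_le
  have hstart_lt : start < cnt := by
    by_contra hcon
    push_neg at hcon
    have hstop := pv_tw_stop (fun k => decide (k ≤ mi.getD start 0 + 15)) 0 mi (by omega)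
    rw [← hcnt] at hstop
    simp only [decide_eq_false_iff_not, Nat.not_le] at hstop
    have hmono : mi.getD cnt 0 ≤ mi.getD start 0 := by
      rcases Nat.lt_or_ge cnt start with hlt | hge
      · have := List.pairwise_iff_getElem.mp hl cnt start (by omega) hs hlt
        rw [List.getD_eq_getElem mi 0 (by omega), List.getD_eq_getElem mi 0 hs]
        omega
      · have : cnt = start := by omega
        rw [this]
    omega
  rw [← List.drop_take]
  rw [← List.filter_filter (p := fun a => decide (mi.getD start 0 ≤ a))
      (q := fun k => decide (k ≤ mi.getD start 0 + 15)) (l := mi)]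
  rw [pv_filter_le_eq_takeWhile mi (mi.getD start 0 + 15) hl, htw]
  have htp : (mi.take cnt).Pairwise (· < ·) := hl.sublist (List.take_sublist cnt mi)
  have hslen : start < (mi.take cnt).length := by simp; omega
  have hgd : (mi.take cnt).getD start 0 = mi.getD start 0 := by
    rw [List.getD_eq_getElem _ 0 hslen, List.getElem_take, List.getD_eq_getElem mi 0 hs]
  rw [← hgd]
  exact (pv_filter_drop (mi.take cnt) htp start hslen).symm

theorem pv_A_window_eq (s : List String) (P : String → Bool) (mi : List Nat)
    (hmi : mi = (List.range s.length).filter (fun k => P (s.getD k ""))) (v : Nat) :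
    (mi.filter (fun k => decide (v ≤ k) && decide (k ≤ v + 15))).map (fun k => s.getD k "")
      = pvW s P v := by
  subst hmi
  rw [pv_W_eq_map s P v]
  congr 1
  unfold pvK
  rw [List.filter_filter]
  apply List.filter_congr
  intro k _
  cases hP : P (s.getD k "") <;> simp [hP]
  rw [← Bool.decide_and, ← Bool.decide_and]
  exact decide_eq_decide.mpr (by omega)

theorem pv_loopB_iff (s : List String) (tset : PySem.Set String) (required : Nat) (h : Option String) :
    ∀ i, pvLoopB s tset required h i = true
      ↔ ∃ j, i ≤ j ∧ j < s.length ∧ pvCond s (fun w => tset.contains w) required h j = true := by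
  intro i
  fun_induction pvLoopB s tset required h i with
  | case1 i hi uniq hc =>
    simp only [true_iff]
    refine ⟨i, Nat.le_refl i, hi, ?_⟩
    simp only [pvCond, pvW]
    exact hc
  | case2 i hi uniq hc ih =>
    rw [ih]
    constructor
    · rintro ⟨j, h1, h2, h3⟩
      exact ⟨j, by omega, h2, h3⟩
    · rintro ⟨j, h1, h2, h3⟩
      rcases Nat.eq_or_lt_of_le h1 with rfl | hlt
      · refine absurd h3 ?_
        simp only [pvCond, pvW]
        exact hc
      · exact ⟨j, by omega, h2, h3⟩
  | case3 i hi =>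
    simp only [Bool.false_eq_true, false_iff]
    rintro ⟨j, h1, h2, _⟩
    omega

theorem pv_loopA_iff (s : List String) (required : Nat) (h : Option String) (tset : PySem.Set String)
    (mi : List Nat) (hmi : mi = (List.range s.length).filter (fun k => tset.contains (s.getD k ""))) :
    ∀ (d start e : Nat), mi.length - start ≤ d →
      (∀ st, start ≤ st → st < mi.length → e ≤ (mi.takeWhile (fun k => decide (k ≤ mi.getD st 0 + 15))).length) →
      (pvLoopA s required h mi start e = true
        ↔ ∃ st, start ≤ st ∧ st < mi.length ∧ pvCond s (fun w => tset.contains w) required h (mi.getD st 0) = true) := by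
  have hl : mi.Pairwise (· < ·) := by
    rw [hmi]; exact List.pairwise_lt_range.filter _
  have hget := List.pairwise_iff_getElem.mp hl
  intro d
  induction d with
  | zero =>
    intro start e h1 h2
    rw [pvLoopA, dif_neg (by omega)]
    simp only [Bool.false_eq_true, false_iff]
    rintro ⟨st, hs1, hs2, _⟩
    omega
  | succ d ih =>
    intro start e h1 h2
    by_cases hs : start < mi.length
    · have he' : pvAdvEnd mi (mi.getD start 0) e
          = (mi.takeWhile (fun k => decide (k ≤ mi.getD start 0 + 15))).length :=
        pv_advEnd_eq mi _ e (h2 start (Nat.le_refl _) hs)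
      have hwin : ((mi.drop start).take (pvAdvEnd mi (mi.getD start 0) e - start)).map (fun k => s.getD k "")
          = pvW s (fun w => tset.contains w) (mi.getD start 0) := by
        rw [he', pv_slice_eq mi hl start hs]
        exact pv_A_window_eq s _ mi hmi _
      rw [pvLoopA, dif_pos hs]
      simp only [hwin]
      by_cases hc : pvCond s (fun w => tset.contains w) required h (mi.getD start 0) = true
      · rw [if_pos (by simpa [pvCond] using hc)]
        simp only [true_iff]
        exact ⟨start, Nat.le_refl _, hs, hc⟩
      · rw [if_neg (by simpa [pvCond] using hc)]
        have hinv : ∀ st, start + 1 ≤ st → st < mi.length →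
            pvAdvEnd mi (mi.getD start 0) e
              ≤ (mi.takeWhile (fun k => decide (k ≤ mi.getD st 0 + 15))).length := by
          intro st hst1 hst2
          rw [he']
          apply pv_tw_mono
          intro k hk
          simp only [decide_eq_true_eq] at hk ⊢
          have : mi.getD start 0 ≤ mi.getD st 0 := by
            rcases Nat.eq_or_lt_of_le (Nat.le_of_succ_le hst1) with heq | hlt
            · rw [heq]
            · have := hget start st hs hst2 hlt
              rw [List.getD_eq_getElem mi 0 hs, List.getD_eq_getElem mi 0 hst2]
              omega
          omega
        rw [ih (start + 1) (pvAdvEnd mi (mi.getD start 0) e) (by omega) hinv]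
        constructor
        · rintro ⟨st, h1', h2', h3'⟩
          exact ⟨st, by omega, h2', h3'⟩
        · rintro ⟨st, h1', h2', h3'⟩
          rcases Nat.eq_or_lt_of_le h1' with rfl | hlt
          · exact absurd h3' hc
          · exact ⟨st, by omega, h2', h3'⟩
    · rw [pvLoopA, dif_neg hs]
      simp only [Bool.false_eq_true, false_iff]
      rintro ⟨st, hs1, hs2, _⟩
      omega

theorem pv_mem_K (s : List String) (P : String → Bool) (i k : Nat) :
    k ∈ pvK s P i ↔ k < s.length ∧ i ≤ k ∧ k < i + 16 ∧ P (s.getD k "") = true := by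
  unfold pvK
  simp [List.mem_filter, List.mem_range, and_assoc]

theorem pv_subset_cond (s : List String) (P : String → Bool) (required : Nat) (h : Option String)
    (j m : Nat) (hsub : ∀ x ∈ pvW s P j, x ∈ pvW s P m)
    (hc : pvCond s P required h j = true) : pvCond s P required h m = true := by
  simp only [pvCond, Bool.and_eq_true] at hc ⊢
  have hsub' : PySem.Set.ofList (pvW s P j) ⊆ PySem.Set.ofList (pvW s P m) := by
    intro x hx
    rw [PySem.Set.mem_ofList] at hx ⊢
    exact hsub x hx
  constructor
  · have hlen : (PySem.Set.ofList (pvW s P j)).length ≤ (PySem.Set.ofList (pvW s P m)).length :=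
      (List.subperm_of_subset (PySem.Set.nodup_ofList _) hsub').length_le
    have := hc.1
    simp only [decide_eq_true_eq] at this ⊢
    omega
  · rcases hc.2 with h2
    rcases Bool.or_eq_true _ _ |>.mp h2 with ht | hin
    · exact Bool.or_eq_true _ _ |>.mpr (Or.inl ht)
    · refine Bool.or_eq_true _ _ |>.mpr (Or.inr ?_)
      cases h with
      | none => simpa [pvHeadIn] using hin
      | some hs0 =>
        simp only [pvHeadIn, List.contains_iff_mem] at hin ⊢
        exact hsub' hin

theorem pv_core (s : List String) (h : Option String) (required : Nat) (tset : PySem.Set String)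
    (hreq1 : 1 ≤ required) :
    (if (PySem.Set.ofList (((List.range s.length).filter (fun i => tset.contains (s.getD i ""))).map (fun i => s.getD i ""))).length < required then false
     else pvLoopA s required h ((List.range s.length).filter (fun i => tset.contains (s.getD i ""))) 0 0)
      = pvLoopB s tset required h 0 := by
  set mi : List Nat := (List.range s.length).filter (fun i => tset.contains (s.getD i "")) with hmi
  have hmem_mi : ∀ k, k ∈ mi ↔ k < s.length ∧ (fun w => tset.contains w) (s.getD k "") = true := by
    intro k
    rw [hmi]
    simp [List.mem_filter, List.mem_range]
  have hB := pv_loopB_iff s tset required h 0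
  by_cases hfe : (PySem.Set.ofList (mi.map (fun i => s.getD i ""))).length < required
  · rw [if_pos hfe]
    symm
    rw [← Bool.not_eq_true]
    intro hBtrue
    obtain ⟨j, _, hjn, hc⟩ := hB.mp hBtrue
    have hsub : PySem.Set.ofList (pvW s (fun w => tset.contains w) j)
        ⊆ PySem.Set.ofList (mi.map (fun i => s.getD i "")) := by
      intro x hx
      rw [PySem.Set.mem_ofList] at hx ⊢
      rw [pv_W_eq_map] at hx
      obtain ⟨k, hk, rfl⟩ := List.mem_map.mp hx
      refine List.mem_map.mpr ⟨k, ?_, rfl⟩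
      rw [hmem_mi]
      have := (pv_mem_K s (fun w => tset.contains w) j k).mp hk
      exact ⟨this.1, this.2.2.2⟩
    have hlen : (PySem.Set.ofList (pvW s (fun w => tset.contains w) j)).length
        ≤ (PySem.Set.ofList (mi.map (fun i => s.getD i ""))).length :=
      (List.subperm_of_subset (PySem.Set.nodup_ofList _) hsub).length_le
    simp only [pvCond, Bool.and_eq_true, decide_eq_true_eq] at hc
    have := hc.1
    omega
  rw [if_neg hfe]
  have hA := pv_loopA_iff s required h tset mi hmi mi.length 0 0 (by omega)
    (fun st _ _ => Nat.zero_le _)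
  rcases Bool.eq_false_or_eq_true (pvLoopB s tset required h 0) with hBt | hBf
  · rw [hBt, hA]
    obtain ⟨j, _, hjn, hc⟩ := hB.mp hBt
    have hne : pvW s (fun w => tset.contains w) j ≠ [] := by
      intro hnil
      simp only [pvCond, hnil, Bool.and_eq_true, decide_eq_true_eq] at hc
      have h1 := hc.1
      simp only [PySem.Set.ofList_nil, List.length_nil] at h1
      omega
    have hKne : pvK s (fun w => tset.contains w) j ≠ [] := by
      intro hnil
      rw [pv_W_eq_map, hnil] at hne
      simp at hne
    obtain ⟨m, t, hKcons⟩ := List.exists_cons_of_ne_nil hKne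
    have hmK : m ∈ pvK s (fun w => tset.contains w) j := by
      rw [hKcons]; exact List.mem_cons_self
    have hmfacts := (pv_mem_K s (fun w => tset.contains w) j m).mp hmK
    have hmmi : m ∈ mi := (hmem_mi m).mpr ⟨hmfacts.1, hmfacts.2.2.2⟩
    obtain ⟨st, hst, hsteq⟩ := List.mem_iff_getElem.mp hmmi
    have hKpair : (pvK s (fun w => tset.contains w) j).Pairwise (· < ·) := by
      unfold pvK
      exact List.pairwise_lt_range.filter _
    have hleast : ∀ k ∈ pvK s (fun w => tset.contains w) j, m ≤ k := by
      intro k hk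
      rw [hKcons] at hk hKpair
      rcases List.mem_cons.mp hk with rfl | hkt
      · exact Nat.le_refl _
      · exact Nat.le_of_lt ((List.pairwise_cons.mp hKpair).1 k hkt)
    have hsub : ∀ x ∈ pvW s (fun w => tset.contains w) j, x ∈ pvW s (fun w => tset.contains w) m := by
      intro x hx
      rw [pv_W_eq_map] at hx ⊢
      obtain ⟨k, hk, rfl⟩ := List.mem_map.mp hx
      refine List.mem_map.mpr ⟨k, ?_, rfl⟩
      have hf := (pv_mem_K s (fun w => tset.contains w) j k).mp hk
      rw [pv_mem_K]
      exact ⟨hf.1, hleast k hk, by have := hmfacts.2.1; omega, hf.2.2.2⟩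
    refine ⟨st, Nat.zero_le _, hst, ?_⟩
    have heq : mi.getD st 0 = m := by rw [List.getD_eq_getElem mi 0 hst, hsteq]
    rw [heq]
    exact pv_subset_cond s (fun w => tset.contains w) required h j m hsub hc
  · rw [hBf, ← Bool.not_eq_true, hA]
    rintro ⟨st, _, hst, hcond⟩
    have hstmem : mi.getD st 0 ∈ mi := by
      rw [List.getD_eq_getElem mi 0 hst]
      exact List.getElem_mem _
    have hlt : mi.getD st 0 < s.length := ((hmem_mi _).mp hstmem).1
    have hBtrue : pvLoopB s tset required h 0 = true :=
      hB.mpr ⟨mi.getD st 0, Nat.zero_le _, hlt, hcond⟩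
    rw [hBf] at hBtrue
    exact absurd hBtrue (by simp)

theorem pv_main (tl : List String) (h : Option String) (s : List String) :
    check_match_with_proximity tl h s = check_match_with_proximity_alt tl h s := by
  unfold check_match_with_proximity check_match_with_proximity_alt
  by_cases hemp : tl.isEmpty
  · rw [if_pos hemp, if_pos hemp]
  rw [if_neg hemp, if_neg hemp]
  by_cases hguard : (pvTruthy h && !(pvHeadIn h s)) = true
  · rw [if_pos hguard, if_pos hguard]
  rw [if_neg hguard, if_neg hguard]
  have hreq1 : 1 ≤ (if tl.length ≤ 2 then tl.length else (3 * tl.length + 3) / 4) := by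
    have htl : tl.length ≠ 0 := fun h0 => hemp (List.isEmpty_iff_length_eq_zero.mpr h0)
    split <;> omega
  exact pv_core s h _ (PySem.Set.ofList tl) hreq1

-- ===== VERDICT (by name: the statement is the Claim_ definition above) =====
theorem check_match_with_proximity_spec : Claim_equal_check_match_with_proximity := by
  intro tl h s _
  unfold Spec_check_match_with_proximity
  exact pv_main tl h s
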